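-- pv_equiv track=rewrite | github.com/therealjuanmartinez/clisa | clisa/json_detector.py | could_be_json
-- ===== SOURCE A (Python) =====
-- def could_be_json(s):
--     s = s.strip()
--     if not (s.startswith("{") or s.startswith("[")):
--         return False
--
--     stack = []
--     in_string = False
--     escaped = False
--
--     for i, char in enumerate(s):
--         if not in_string:
--             if char in "{[":
--                 stack.append(char)
--             elif char in "]}":
--                 if not stack or (stack[-1] + char) not in ["{}", "[]"]:
--                     return False
--                 stack.pop()
--             elif char == '"':
--                 in_string = True
--         else:
--             if char == '"' and not escaped:
--                 in_string = False
--             elif char == "\\" and not escaped: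
--                 escaped = True
--             else:
--                 escaped = False
--
--         # If stack is empty and we're at the end of the string, check for trailing characters
--         if not stack and i < len(s) - 1:
--             remaining = s[i + 1 :].strip()
--             if remaining:
--                 return False
--
--     # Make sure the stack is empty, indicating all braces/brackets closed properly
--     return True
-- ===== SOURCE B (Python) =====
-- def _skeleton(s):
--     # one pass: bracket characters occurring outside string literals, with their indices
--     sk = []
--     in_string = False
--     escaped = False
--     for i, ch in enumerate(s):
--         if in_string:
--             if ch == '"' and not escaped:
--                 in_string = False
--             elif ch == '\\' and not escaped:
--                 escaped = True
--             else:
--                 escaped = False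
--         else:
--             if ch in '{}[]':
--                 sk.append((i, ch))
--             elif ch == '"':
--                 in_string = True
--     return sk
--
--
-- def could_be_json(s):
--     s = s.strip()
--     if not s or s[0] not in '{[':
--         return False
--     stack = []
--     first_empty = None
--     for i, ch in _skeleton(s):
--         if ch in '{[':
--             stack.append(ch)
--         else:
--             if not stack or (stack[-1], ch) not in [('{', '}'), ('[', ']')]:
--                 return False
--             stack.pop()
--             if not stack and first_empty is None:
--                 first_empty = i
--     if first_empty is not None and s[first_empty + 1:].strip():
--         return False
--     return True
-- ===== Notes on version B (the rewrite author's own statement) =====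
-- stated objective: alternative
-- what changed: A's single fused loop (bracket stack + string/escape automaton + per-character trailing-content re-strip) is split into two passes: one scan extracts the bracket skeleton outside string literals with indices, then a stack pass over that skeleton validates closers and records where the stack first empties, with a single trailing-content check at the end.
import Mathlib
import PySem

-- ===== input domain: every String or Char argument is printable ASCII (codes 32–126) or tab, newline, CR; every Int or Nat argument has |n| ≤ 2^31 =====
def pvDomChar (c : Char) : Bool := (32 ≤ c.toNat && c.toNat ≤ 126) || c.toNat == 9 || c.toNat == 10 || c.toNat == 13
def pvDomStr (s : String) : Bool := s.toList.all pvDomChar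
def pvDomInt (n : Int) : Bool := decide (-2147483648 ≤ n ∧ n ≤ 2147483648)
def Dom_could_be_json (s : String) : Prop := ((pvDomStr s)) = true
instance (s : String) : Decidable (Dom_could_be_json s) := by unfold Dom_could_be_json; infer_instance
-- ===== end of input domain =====

-- B re-decomposes A's single fused loop into two passes (bracket skeleton outside strings,
-- then a stack check over the skeleton); same cost, objective: alternative decomposition.

-- ===== PORT A =====
/-- One iteration of A's `for` body: `none` is A's early `return False`, otherwise the
updated `(stack, in_string, escaped)`. -/
def aStep (ch : Char) (stack : List Char) (inStr esc : Bool) :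
    Option (List Char × Bool × Bool) :=
  if inStr = false then
    if ch = '{' ∨ ch = '[' then some (ch :: stack, inStr, esc)
    else if ch = ']' ∨ ch = '}' then
      match stack with
      | [] => none
      | top :: rest =>
        if (top = '{' ∧ ch = '}') ∨ (top = '[' ∧ ch = ']') then some (rest, inStr, esc)
        else none
    else if ch = '"' then some (stack, true, esc)
    else some (stack, inStr, esc)
  else
    if ch = '"' ∧ esc = false then some (stack, false, esc)
    else if ch = '\\' ∧ esc = false then some (stack, inStr, true)
    else some (stack, inStr, false)

/-- A's loop, structural recursion over the remaining characters.  The index `i` of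
`enumerate` is consumed only by `s[i+1:]` (which IS the tail `tl`) and by
`i < len(s) - 1` (which IS `tl ≠ []`), so the recursion carries the tail itself. -/
def aLoop : List Char → List Char → Bool → Bool → Bool
  | [], _, _, _ => true
  | ch :: tl, stack, inStr, esc =>
    match aStep ch stack inStr esc with
    | none => false
    | some (stack', inStr', esc') =>
      -- `if not stack and i < len(s)-1: remaining = s[i+1:].strip(); if remaining: return False`
      if stack' = [] ∧ tl ≠ [] ∧ PySem.Chars.strip tl ≠ [] then false
      else aLoop tl stack' inStr' esc'

def could_be_json (s : String) : Bool :=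
  let cs := PySem.Chars.strip s.toList
  if PySem.Chars.startswith cs ['{'] || PySem.Chars.startswith cs ['['] then
    aLoop cs [] false false
  else false

-- ===== PORT B =====
/-- `_skeleton`: the bracket characters occurring outside string literals, with indices. -/
def bSkel : List Char → Nat → Bool → Bool → List (Nat × Char)
  | [], _, _, _ => []
  | ch :: tl, i, inStr, esc =>
    if inStr = true then
      if ch = '"' ∧ esc = false then bSkel tl (i + 1) false esc
      else if ch = '\\' ∧ esc = false then bSkel tl (i + 1) true true
      else bSkel tl (i + 1) true false
    else
      if ch = '{' ∨ ch = '}' ∨ ch = '[' ∨ ch = ']' then (i, ch) :: bSkel tl (i + 1) inStr esc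
      else if ch = '"' then bSkel tl (i + 1) true esc
      else bSkel tl (i + 1) inStr esc

/-- B's stack pass over the skeleton: `none` is B's `return False`, otherwise
`some first_empty` where `first_empty` is the index at which the stack first emptied. -/
def bStack : List (Nat × Char) → List Char → Option Nat → Option (Option Nat)
  | [], _, fe => some fe
  | (i, ch) :: sk, stack, fe =>
    if ch = '{' ∨ ch = '[' then bStack sk (ch :: stack) fe
    else
      match stack with
      | [] => none
      | top :: rest =>
        if (top = '{' ∧ ch = '}') ∨ (top = '[' ∧ ch = ']') then
          bStack sk rest (if rest = [] ∧ fe = none then some i else fe)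
        else none

def could_be_json_alt (s : String) : Bool :=
  match PySem.Chars.strip s.toList with
  | [] => false
  | c :: cs =>
    if c = '{' ∨ c = '[' then
      match bStack (bSkel (c :: cs) 0 false false) [] none with
      | none => false
      | some none => true
      | some (some j) => (PySem.Chars.strip ((c :: cs).drop (j + 1))).isEmpty -- s[first_empty+1:].strip()
    else false

-- ===== PRECONDITION & SPEC =====
def Spec_could_be_json (s : String) (out : Bool) : Prop := out = could_be_json_alt s
instance (s : String) (out : Bool) : Decidable (Spec_could_be_json s out) := by unfold Spec_could_be_json; infer_instance

-- ===== CLAIM (what is proved, stated in full; the proofs are below) =====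
def Claim_equal_could_be_json : Prop := ∀ (s : String), Dom_could_be_json s → Spec_could_be_json s (could_be_json s)

-- ===== LEMMAS AND PROOFS =====

/-- Proof-side wrapper for B's final `match`/trailing-content check. -/
def pvFinish (rest : List Char) : Option (Option Nat) → Bool
  | none => false
  | some none => true
  | some (some j) => (PySem.Chars.strip (rest.drop (j + 1))).isEmpty

theorem strip_eq_nil_iff (cs : List Char) :
    PySem.Chars.strip cs = [] ↔ ∀ c ∈ cs, PySem.Chars.isspace c := by
  unfold PySem.Chars.strip PySem.Chars.rstrip PySem.Chars.lstrip
  rw [List.reverse_eq_nil_iff, List.dropWhile_eq_nil_iff]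
  simp only [List.mem_reverse]
  constructor
  · intro h c hc
    by_cases hd : c ∈ List.dropWhile PySem.Chars.isspace cs
    · exact h c hd
    · have hm : c ∈ List.takeWhile PySem.Chars.isspace cs ++ List.dropWhile PySem.Chars.isspace cs := by
        rw [List.takeWhile_append_dropWhile]; exact hc
      rcases List.mem_append.mp hm with h1 | h1
      · exact List.mem_takeWhile_imp h1
      · exact absurd h1 hd
  · intro h c hc
    exact h c ((List.dropWhile_sublist _).mem hc)

theorem bSkel_shift (cs : List Char) : ∀ (i : Nat) (b e : Bool),
    bSkel cs (i + 1) b e = (bSkel cs i b e).map (fun p => (p.1 + 1, p.2)) := by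
  induction cs with
  | nil => simp [bSkel]
  | cons ch tl ih =>
    intro i b e
    simp only [bSkel]
    split_ifs <;> simp [ih]

theorem bStack_shift (sk : List (Nat × Char)) : ∀ (st : List Char) (fe : Option Nat),
    bStack (sk.map (fun p => (p.1 + 1, p.2))) st (fe.map (· + 1)) =
      (bStack sk st fe).map (Option.map (· + 1)) := by
  induction sk with
  | nil => simp [bStack]
  | cons p sk ih =>
    obtain ⟨i, ch⟩ := p
    intro st fe
    by_cases h1 : ch = '{' ∨ ch = '['
    · simp only [List.map_cons, bStack, if_pos h1]
      exact ih _ _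
    · cases st with
      | nil => simp [bStack, h1]
      | cons top rest =>
        by_cases h2 : (top = '{' ∧ ch = '}') ∨ (top = '[' ∧ ch = ']')
        · simp only [List.map_cons, bStack, if_pos h2, if_neg h1]
          cases fe with
          | none =>
            by_cases hr : rest = [] <;>
              simpa [hr] using ih rest (if rest = [] then some i else none)
          | some j => simpa using ih rest (some j)
        · simp [bStack, h1, h2]

theorem bStack_fe_some (sk : List (Nat × Char)) : ∀ (st : List Char) (j : Nat),
    bStack sk st (some j) = none ∨ bStack sk st (some j) = some (some j) := by
  induction sk with
  | nil => intro st j; right; rfl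
  | cons p sk ih =>
    obtain ⟨i, ch⟩ := p
    intro st j
    by_cases h1 : ch = '{' ∨ ch = '['
    · simp only [bStack, if_pos h1]
      exact ih _ _
    · cases st with
      | nil => left; simp [bStack, h1]
      | cons top rest =>
        by_cases h2 : (top = '{' ∧ ch = '}') ∨ (top = '[' ∧ ch = ']')
        · simp only [bStack, if_pos h2, if_neg h1]
          simpa using ih rest j
        · left; simp [bStack, h1, h2]

theorem shift_finish (ch : Char) (tl : List Char) (b e : Bool) (st : List Char) :
    pvFinish (ch :: tl) (bStack (bSkel tl 1 b e) st none) =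
      pvFinish tl (bStack (bSkel tl 0 b e) st none) := by
  rw [show (1:Nat) = 0 + 1 from rfl, bSkel_shift,
    show (none : Option Nat) = Option.map (·+1) none from rfl, bStack_shift]
  cases hr : bStack (bSkel tl 0 b e) st none with
  | none => simp [pvFinish, hr]
  | some o => cases o <;> simp [pvFinish, hr, List.drop_succ_cons]

theorem aLoop_ws (tl : List Char) : ∀ (esc : Bool),
    (∀ c ∈ tl, PySem.Chars.isspace c) → aLoop tl [] false esc = true := by
  induction tl with
  | nil => intro esc h; simp [aLoop]
  | cons ch tl ih =>
    intro esc h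
    have hch : PySem.Chars.isspace ch = true := h ch (by simp)
    have h1 : ch ≠ '{' := by rintro rfl; exact absurd hch (by decide)
    have h2 : ch ≠ '[' := by rintro rfl; exact absurd hch (by decide)
    have h3 : ch ≠ ']' := by rintro rfl; exact absurd hch (by decide)
    have h4 : ch ≠ '}' := by rintro rfl; exact absurd hch (by decide)
    have h5 : ch ≠ '\"' := by rintro rfl; exact absurd hch (by decide)
    have hts : PySem.Chars.strip tl = [] :=
      (strip_eq_nil_iff tl).mpr (fun c hc => h c (by simp [hc]))
    simp [aLoop, aStep, h1, h2, h3, h4, h5, hts, ih esc (fun c hc => h c (by simp [hc]))]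

theorem bSkel_ws (tl : List Char) : ∀ (i : Nat) (esc : Bool),
    (∀ c ∈ tl, PySem.Chars.isspace c) → bSkel tl i false esc = [] := by
  induction tl with
  | nil => intro i esc h; simp [bSkel]
  | cons ch tl ih =>
    intro i esc h
    have hch : PySem.Chars.isspace ch = true := h ch (by simp)
    have h1 : ch ≠ '{' := by rintro rfl; exact absurd hch (by decide)
    have h2 : ch ≠ '[' := by rintro rfl; exact absurd hch (by decide)
    have h3 : ch ≠ ']' := by rintro rfl; exact absurd hch (by decide)
    have h4 : ch ≠ '}' := by rintro rfl; exact absurd hch (by decide)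
    have h5 : ch ≠ '\"' := by rintro rfl; exact absurd hch (by decide)
    simp [bSkel, h1, h2, h3, h4, h5, ih _ esc (fun c hc => h c (by simp [hc]))]

theorem bridge (rest : List Char) : ∀ (stack : List Char) (inStr esc : Bool), stack ≠ [] →
    aLoop rest stack inStr esc =
      pvFinish rest (bStack (bSkel rest 0 inStr esc) stack none) := by
  induction rest with
  | nil => intro stack b e _; simp [aLoop, bSkel, bStack, pvFinish]
  | cons ch tl ih =>
    intro stack b e hst
    cases b with
    | true =>
      by_cases hq : ch = '"' ∧ e = false
      · have hl : aLoop (ch :: tl) stack true e = aLoop tl stack false e := by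
          simp [aLoop, aStep, hq, hst]
        rw [hl, show bSkel (ch :: tl) 0 true e = bSkel tl 1 false e from by simp [bSkel, hq],
          shift_finish]
        exact ih stack false e hst
      · by_cases hb2 : ch = '\\' ∧ e = false
        · have hl : aLoop (ch :: tl) stack true e = aLoop tl stack true true := by
            simp [aLoop, aStep, hb2, hst]
          rw [hl, show bSkel (ch :: tl) 0 true e = bSkel tl 1 true true from by
              simp [bSkel, hb2], shift_finish]
          exact ih stack true true hst
        · have hl : aLoop (ch :: tl) stack true e = aLoop tl stack true false := by
            simp [aLoop, aStep, hq, hb2, hst]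
          rw [hl, show bSkel (ch :: tl) 0 true e = bSkel tl 1 true false from by
              simp [bSkel, hq, hb2], shift_finish]
          exact ih stack true false hst
    | false =>
      by_cases hop : ch = '{' ∨ ch = '['
      · have hbr : ch = '{' ∨ ch = '}' ∨ ch = '[' ∨ ch = ']' := by tauto
        have hl : aLoop (ch :: tl) stack false e = aLoop tl (ch :: stack) false e := by
          simp [aLoop, aStep, hop]
        rw [hl, show bSkel (ch :: tl) 0 false e = (0, ch) :: bSkel tl 1 false e from by
            simp [bSkel, hbr],
          show bStack ((0, ch) :: bSkel tl 1 false e) stack none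
              = bStack (bSkel tl 1 false e) (ch :: stack) none from by simp [bStack, hop],
          shift_finish]
        exact ih (ch :: stack) false e (by simp)
      · by_cases hcl : ch = ']' ∨ ch = '}'
        · have hbr : ch = '{' ∨ ch = '}' ∨ ch = '[' ∨ ch = ']' := by tauto
          cases stack with
          | nil => exact absurd rfl hst
          | cons top rest =>
            by_cases hm : (top = '{' ∧ ch = '}') ∨ (top = '[' ∧ ch = ']')
            · by_cases hrest : rest = []
              · subst hrest
                by_cases hts : PySem.Chars.strip tl = []
                · have hws := (strip_eq_nil_iff tl).mp hts
                  have hl : aLoop (ch :: tl) [top] false e = aLoop tl [] false e := by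
                    simp [aLoop, aStep, hop, hcl, hm, hts]
                  rw [hl, aLoop_ws tl e hws,
                    show bSkel (ch :: tl) 0 false e = [(0, ch)] from by
                      simp [bSkel, hbr, bSkel_ws tl 1 e hws]]
                  simp [bStack, hop, hm, pvFinish, hts]
                · have htl : tl ≠ [] := by rintro rfl; simp [PySem.Chars.strip,
                    PySem.Chars.lstrip, PySem.Chars.rstrip] at hts
                  have hl : aLoop (ch :: tl) [top] false e = false := by
                    simp [aLoop, aStep, hop, hcl, hm, hts, htl]
                  rw [hl, show bSkel (ch :: tl) 0 false e = (0, ch) :: bSkel tl 1 false e from by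
                      simp [bSkel, hbr],
                    show bStack ((0, ch) :: bSkel tl 1 false e) [top] none
                        = bStack (bSkel tl 1 false e) [] (some 0) from by simp [bStack, hop, hm]]
                  rcases bStack_fe_some (bSkel tl 1 false e) [] 0 with h | h <;>
                    simp [pvFinish, h, hts]
              · have hl : aLoop (ch :: tl) (top :: rest) false e = aLoop tl rest false e := by
                  simp [aLoop, aStep, hop, hcl, hm, hrest]
                rw [hl, show bSkel (ch :: tl) 0 false e = (0, ch) :: bSkel tl 1 false e from by
                    simp [bSkel, hbr],
                  show bStack ((0, ch) :: bSkel tl 1 false e) (top :: rest) none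
                      = bStack (bSkel tl 1 false e) rest none from by
                    simp [bStack, hop, hm, hrest],
                  shift_finish]
                exact ih rest false e hrest
            · have hl : aLoop (ch :: tl) (top :: rest) false e = false := by
                simp [aLoop, aStep, hop, hcl, hm]
              rw [hl, show bSkel (ch :: tl) 0 false e = (0, ch) :: bSkel tl 1 false e from by
                  simp [bSkel, hbr]]
              simp [bStack, hop, hm, pvFinish]
        · have hbr : ¬(ch = '{' ∨ ch = '}' ∨ ch = '[' ∨ ch = ']') := by tauto
          by_cases hq : ch = '"'
          · have hl : aLoop (ch :: tl) stack false e = aLoop tl stack true e := by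
              simp [aLoop, aStep, hq, hst]
            rw [hl, show bSkel (ch :: tl) 0 false e = bSkel tl 1 true e from by
                simp [bSkel, hq], shift_finish]
            exact ih stack true e hst
          · have hl : aLoop (ch :: tl) stack false e = aLoop tl stack false e := by
              simp [aLoop, aStep, hop, hcl, hq, hst]
            rw [hl, show bSkel (ch :: tl) 0 false e = bSkel tl 1 false e from by
                simp [bSkel, hbr, hq], shift_finish]
            exact ih stack false e hst


-- ===== VERDICT (by name: the statement is the Claim_ definition above) =====
theorem startswith_singleton (c d : Char) (cs : List Char) :
    PySem.Chars.startswith (c :: cs) [d] = (c == d) := by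
  cases hb : PySem.Chars.startswith (c :: cs) [d] with
  | true =>
    have h := (PySem.Chars.startswith_iff _ _).mp hb
    rw [List.cons_prefix_cons] at h
    simp [h.1.symm]
  | false =>
    symm
    rw [beq_eq_false_iff_ne]
    rintro rfl
    exact absurd ((PySem.Chars.startswith_iff _ _).mpr
      (List.cons_prefix_cons.mpr ⟨rfl, List.nil_prefix⟩)) (by rw [hb]; simp)

theorem could_be_json_spec : Claim_equal_could_be_json := by
  intro s _
  unfold Spec_could_be_json could_be_json could_be_json_alt
  cases hcs : PySem.Chars.strip s.toList with
  | nil => simp [show PySem.Chars.startswith ([] : List Char) ['{'] = false from by decide,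
      show PySem.Chars.startswith ([] : List Char) ['['] = false from by decide]
  | cons c cs =>
    simp only [startswith_singleton]
    by_cases h1 : c = '{' ∨ c = '['
    · have hcond : (c == '{' || c == '[') = true := by
        rcases h1 with rfl | rfl <;> simp
      rw [if_pos hcond, if_pos h1]
      have hl : aLoop (c :: cs) [] false false = aLoop cs [c] false false := by
        simp [aLoop, aStep, h1]
      have hbr : c = '{' ∨ c = '}' ∨ c = '[' ∨ c = ']' := by tauto
      rw [hl, bridge cs [c] false false (by simp),
        show bSkel (c :: cs) 0 false false = (0, c) :: bSkel cs 1 false false from by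
          simp [bSkel, hbr],
        show bStack ((0, c) :: bSkel cs 1 false false) [] none
            = bStack (bSkel cs 1 false false) [c] none from by simp [bStack, h1],
        show (match bStack (bSkel cs 1 false false) [c] none with
              | none => false
              | some none => true
              | some (some j) => (PySem.Chars.strip ((c :: cs).drop (j + 1))).isEmpty)
            = pvFinish (c :: cs) (bStack (bSkel cs 1 false false) [c] none) from rfl,
        shift_finish]
    · have hcond : (c == '{' || c == '[') = false := by
        simp only [Bool.or_eq_false_iff, beq_eq_false_iff_ne]
        exact ⟨fun h => h1 (Or.inl h), fun h => h1 (Or.inr h)⟩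
      rw [if_neg (by simp [hcond]), if_neg h1]
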